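-- pv_equiv track=rewrite | github.com/laurenchen0631/interview | leetcode/python/hard/1063_number_of_valid_subarrays.py | validSubarrays
-- ===== SOURCE A (Python) =====
-- def validSubarrays(nums: list[int]) -> int:
--     mono = []
--     n = len(nums)
--     right_index = [n]*n
--     for i, v in enumerate(nums):
--         while mono and v < nums[mono[-1]]:
--             index = mono.pop(-1)
--             right_index[index] = i
--         mono.append(i)
--     # can replace this loop by sum and arithmetic formula
--     res = 0
--     for i in range(len(nums)):
--         res += right_index[i]-i
--     return res
-- ===== SOURCE B (Python) =====
-- def validSubarrays(nums: list[int]) -> int: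
--     # Single right-to-left pass: stack holds (value, folded subarray count) pairs,
--     # fusing the counting into the scan instead of next-smaller indices + summation.
--     res = 0
--     stack = []  # entries (value, count), top at the end
--     for v in reversed(nums):
--         cnt = 1
--         while stack and stack[-1][0] >= v:
--             cnt += stack.pop()[1]
--         res += cnt
--         stack.append((v, cnt))
--     return res
-- ===== Notes on version B (the rewrite author's own statement) =====
-- stated objective: alternative
-- what changed: Replaces A's left-to-right next-smaller-index computation (index stack + right_index array + separate summation loop) by a single right-to-left pass over the list with a stack of (value, folded subarray count) pairs that accumulates the answer directly.
import Mathlib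
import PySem

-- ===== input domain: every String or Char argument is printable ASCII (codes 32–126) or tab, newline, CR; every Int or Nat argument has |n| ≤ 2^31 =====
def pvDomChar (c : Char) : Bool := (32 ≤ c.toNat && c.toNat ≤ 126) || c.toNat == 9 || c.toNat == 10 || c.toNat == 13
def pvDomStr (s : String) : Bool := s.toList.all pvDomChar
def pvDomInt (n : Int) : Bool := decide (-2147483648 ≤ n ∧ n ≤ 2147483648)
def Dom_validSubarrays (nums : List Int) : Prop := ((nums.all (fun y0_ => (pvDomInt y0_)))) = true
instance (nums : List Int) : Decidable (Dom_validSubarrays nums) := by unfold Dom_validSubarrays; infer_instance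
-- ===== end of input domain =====

-- B replaces A's next-smaller-index array + summation loop by a single right-to-left pass
-- with a stack of (value, folded count) pairs (objective: alternative one-pass formulation).

-- ===== PORT A =====
-- the inner `while mono and v < nums[mono[-1]]` loop; mono's top is the list head
def popA (nums : List Int) (v i : Int) : List Int → List Int → List Int × List Int
  | [], ri => ([], ri)
  | t :: mono, ri =>
    if v < PySem.List.pyGetD nums t 0 then
      popA nums v i mono (PySem.List.pySetD ri t i)
    else (t :: mono, ri)

def validSubarrays (nums : List Int) : Int :=
  let n := nums.length
  let st := (PySem.List.enumerate nums 0).foldl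
    (fun (st : List Int × List Int) p =>
      let r := popA nums p.2 p.1 st.1 st.2
      (p.1 :: r.1, r.2))
    ([], List.replicate n ((n : Nat) : Int))
  (PySem.List.pyRange 0 (n : Int)).foldl
    (fun res i => res + (PySem.List.pyGetD st.2 i 0 - i)) 0

-- ===== PORT B =====
-- the inner `while stack and stack[-1][0] >= v` loop; stack's top is the list head
def popB (v : Int) : List (Int × Int) → Int → List (Int × Int) × Int
  | [], cnt => ([], cnt)
  | e :: stack, cnt => if v ≤ e.1 then popB v stack (cnt + e.2) else (e :: stack, cnt)

def validSubarrays_alt (nums : List Int) : Int :=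
  (nums.reverse.foldl
    (fun (st : List (Int × Int) × Int) v =>
      let r := popB v st.1 1
      ((v, r.2) :: r.1, st.2 + r.2))
    ([], 0)).2

-- ===== PRECONDITION & SPEC =====
def Spec_validSubarrays (nums : List Int) (out : Int) : Prop := out = validSubarrays_alt nums
instance (nums : List Int) (out : Int) : Decidable (Spec_validSubarrays nums out) := by unfold Spec_validSubarrays; infer_instance

-- ===== CLAIM (what is proved, stated in full; the proofs are below) =====
def Claim_equal_validSubarrays : Prop := ∀ (nums : List Int), Dom_validSubarrays nums → Spec_validSubarrays nums (validSubarrays nums)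

-- ===== LEMMAS AND PROOFS =====

-- length of the leading run of elements ≥ v
def runLen (v : Int) : List Int → Nat
  | [] => 0
  | x :: l => if x < v then 0 else runLen v l + 1

-- reference value: for each suffix v :: l, count 1 + (leading run of l of elements ≥ v)
def S : List Int → Int
  | [] => 0
  | v :: l => (1 + (runLen v l : Int)) + S l

theorem runLen_le_length (v : Int) (l : List Int) : runLen v l ≤ l.length := by
  induction l with
  | nil => simp [runLen]
  | cons x l ih => by_cases h : x < v <;> simp [runLen, h] <;> omega

theorem runLen_append_of_ge (v : Int) (seg rest : List Int) (h : ∀ x ∈ seg, v ≤ x) :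
    runLen v (seg ++ rest) = seg.length + runLen v rest := by
  induction seg with
  | nil => simp
  | cons x s ih =>
    have hx : ¬ x < v := not_lt.2 (h x (by simp))
    simp only [List.cons_append, runLen, if_neg hx, List.length_cons]
    rw [ih (fun y hy => h y (by simp [hy]))]; omega

theorem runLen_append_head_lt (v w : Int) (seg rest : List Int)
    (hh : seg.head? = some w) (hlt : w < v) : runLen v (seg ++ rest) = 0 := by
  cases seg with
  | nil => simp at hh
  | cons x s =>
    simp only [List.head?_cons, Option.some.injEq] at hh
    subst hh
    simp [runLen, hlt]

theorem runLen_take_ge (v : Int) (l : List Int) : ∀ x ∈ l.take (runLen v l), v ≤ x := by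
  induction l with
  | nil => simp
  | cons y l ih =>
    by_cases h : y < v
    · simp [runLen, h]
    · simp only [runLen, if_neg h, List.take_succ_cons, List.mem_cons]
      rintro x (rfl | hx)
      · exact not_lt.1 h
      · exact ih x hx

-- ===== B side: stack invariant =====
inductive StkInv : List (Int × Int) → List Int → Prop
  | nil : StkInv [] []
  | cons (w c : Int) (st : List (Int × Int)) (seg rest : List Int) :
      seg.head? = some w → c = (seg.length : Int) → (∀ x ∈ seg, w ≤ x) →
      (∀ p ∈ st, p.1 < w) → StkInv st rest → StkInv ((w, c) :: st) (seg ++ rest)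

theorem popB_spec (v : Int) : ∀ {stack : List (Int × Int)} {l : List Int} (cnt : Int),
    StkInv stack l →
    (popB v stack cnt).2 = cnt + (runLen v l : Int) ∧
    (∀ p ∈ (popB v stack cnt).1, p.1 < v) ∧
    StkInv (popB v stack cnt).1 (l.drop (runLen v l)) := by
  intro stack l cnt hinv
  induction hinv generalizing cnt with
  | nil => simpa [popB, runLen] using StkInv.nil
  | cons w c st seg rest hh hc hge hlt hst ih =>
    by_cases hvw : v ≤ w
    · have hsegv : ∀ x ∈ seg, v ≤ x := fun x hx => le_trans hvw (hge x hx)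
      have hrl : runLen v (seg ++ rest) = seg.length + runLen v rest :=
        runLen_append_of_ge v seg rest hsegv
      obtain ⟨h1, h2, h3⟩ := ih (cnt + c)
      simp only [popB, if_pos hvw, hrl]
      refine ⟨?_, h2, ?_⟩
      · rw [h1, hc]; push_cast; ring
      · have hdrop : (seg ++ rest).drop (seg.length + runLen v rest) = rest.drop (runLen v rest) := by
          rw [← List.drop_drop, List.drop_left]
        rw [hdrop]; exact h3
    · have hwv : w < v := not_le.1 hvw
      have hrl : runLen v (seg ++ rest) = 0 := runLen_append_head_lt v w seg rest hh hwv
      refine ⟨?_, ?_, ?_⟩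
      · simp [popB, hvw, hrl]
      · simp only [popB, if_neg hvw]
        intro p hp
        rcases List.mem_cons.1 hp with rfl | hp
        · exact hwv
        · exact lt_trans (hlt p hp) hwv
      · simp only [popB, if_neg hvw, hrl, List.drop_zero]
        exact StkInv.cons w c st seg rest hh hc hge hlt hst

theorem StkInv_push (v : Int) (l : List Int) (st : List (Int × Int))
    (hst : StkInv st (l.drop (runLen v l))) (hlt : ∀ p ∈ st, p.1 < v) :
    StkInv ((v, 1 + (runLen v l : Int)) :: st) (v :: l) := by
  have h := StkInv.cons v (1 + (runLen v l : Int)) st (v :: l.take (runLen v l)) (l.drop (runLen v l))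
    (by simp)
    (by simp only [List.length_cons, List.length_take, Nat.min_eq_left (runLen_le_length v l)]; push_cast; ring)
    (by
      intro x hx
      rcases List.mem_cons.1 hx with rfl | hx
      · exact le_refl x
      · exact runLen_take_ge v l x hx)
    hlt hst
  simpa using h

theorem foldB (l : List Int) :
    StkInv ((l.foldr (fun v st =>
        let r := popB v st.1 1
        ((v, r.2) :: r.1, st.2 + r.2)) (([], 0) : List (Int × Int) × Int)).1) l ∧
    (l.foldr (fun v st =>
        let r := popB v st.1 1
        ((v, r.2) :: r.1, st.2 + r.2)) (([], 0) : List (Int × Int) × Int)).2 = S l := by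
  induction l with
  | nil => exact ⟨StkInv.nil, rfl⟩
  | cons v l ih =>
    obtain ⟨hstk, hres⟩ := ih
    obtain ⟨h1, h2, h3⟩ := popB_spec v 1 hstk
    constructor
    · simp only [List.foldr_cons]
      have := StkInv_push v l _ h3 h2
      simpa [h1] using this
    · simp only [List.foldr_cons, hres, h1, S]
      ring

theorem alt_eq_S (nums : List Int) : validSubarrays_alt nums = S nums := by
  unfold validSubarrays_alt
  rw [List.foldl_reverse]
  exact (foldB nums).2

-- ===== A side =====
def valAt (nums : List Int) (t : Nat) : Int := nums.getD t 0

-- absolute "next strictly smaller index to the right (or n)"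
def NS (nums : List Int) (t : Nat) : Nat := t + 1 + runLen (valAt nums t) (nums.drop (t + 1))

def goodUpto (nums : List Int) (t k : Nat) : Prop :=
  ∀ j, t < j → j < k → valAt nums t ≤ valAt nums j

theorem getD_drop (l : List Int) (i j : Nat) : (l.drop i).getD j 0 = l.getD (i + j) 0 := by
  simp [List.getD_eq_getElem?_getD, List.getElem?_drop]

theorem runLen_eq_of (v : Int) : ∀ (l : List Int) (m : Nat),
    (∀ j, j < m → v ≤ l.getD j 0) →
    (m = l.length ∨ (m < l.length ∧ l.getD m 0 < v)) →
    runLen v l = m := by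
  intro l
  induction l with
  | nil =>
    intro m _ h2
    rcases h2 with h | h
    · simpa [runLen] using h.symm
    · simp at h
  | cons x l ih =>
    intro m h1 h2
    cases m with
    | zero =>
      rcases h2 with h | h
      · simp at h
      · simp only [List.getD_cons_zero] at h
        simp [runLen, h.2]
    | succ m =>
      have hx : v ≤ x := h1 0 (Nat.succ_pos m)
      have hrec : runLen v l = m := by
        apply ih m
        · intro j hj
          have := h1 (j + 1) (by omega)
          simpa using this
        · rcases h2 with h | h
          · left; simpa using h
          · right; constructor
            · simpa using h.1
            · simpa using h.2
      simp [runLen, not_lt.2 hx, hrec]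

theorem NS_eq_of_stop (nums : List Int) (t k : Nat)
    (htk : t < k) (hk : k < nums.length)
    (hgood : goodUpto nums t k) (hlt : valAt nums k < valAt nums t) : NS nums t = k := by
  have h : runLen (valAt nums t) (nums.drop (t + 1)) = k - (t + 1) := by
    apply runLen_eq_of
    · intro j hj
      rw [getD_drop]
      exact hgood (t + 1 + j) (by omega) (by omega)
    · right
      constructor
      · simp only [List.length_drop]; omega
      · rw [getD_drop]
        have : t + 1 + (k - (t + 1)) = k := by omega
        rw [this]; exact hlt
  unfold NS; omega

theorem NS_eq_of_end (nums : List Int) (t : Nat)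
    (ht : t < nums.length) (hgood : goodUpto nums t nums.length) : NS nums t = nums.length := by
  have h : runLen (valAt nums t) (nums.drop (t + 1)) = nums.length - (t + 1) := by
    apply runLen_eq_of
    · intro j hj
      rw [getD_drop]
      exact hgood (t + 1 + j) (by omega) (by omega)
    · left; rw [List.length_drop]
  unfold NS; omega

def InvA (nums : List Int) (k : Nat) (mono ri : List Int) : Prop :=
  ri.length = nums.length ∧
  ∃ monoN : List Nat,
    mono = monoN.map (fun t : Nat => (t : Int)) ∧
    monoN.Pairwise (fun a b => b < a ∧ valAt nums b ≤ valAt nums a) ∧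
    (∀ t ∈ monoN, t < k ∧ goodUpto nums t k ∧ PySem.List.pyGetD ri (t : Int) 0 = (nums.length : Int)) ∧
    (∀ t : Nat, t < k → t ∉ monoN → PySem.List.pyGetD ri (t : Int) 0 = (NS nums t : Int)) ∧
    (∀ t : Nat, k ≤ t → t < nums.length → PySem.List.pyGetD ri (t : Int) 0 = (nums.length : Int))

theorem popA_go (nums : List Int) (k : Nat) (hk : k < nums.length) :
    ∀ (monoN : List Nat) (ri : List Int),
    ri.length = nums.length →
    monoN.Pairwise (fun a b => b < a ∧ valAt nums b ≤ valAt nums a) →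
    (∀ t ∈ monoN, t < k ∧ goodUpto nums t k ∧ PySem.List.pyGetD ri (t : Int) 0 = (nums.length : Int)) →
    (∀ t : Nat, t < k → t ∉ monoN → PySem.List.pyGetD ri (t : Int) 0 = (NS nums t : Int)) →
    (∀ t : Nat, k ≤ t → t < nums.length → PySem.List.pyGetD ri (t : Int) 0 = (nums.length : Int)) →
    ∃ monoN' : List Nat,
      (popA nums (valAt nums k) (k : Int) (monoN.map (fun t : Nat => (t : Int))) ri).1 = monoN'.map (fun t : Nat => (t : Int)) ∧
      (popA nums (valAt nums k) (k : Int) (monoN.map (fun t : Nat => (t : Int))) ri).2.length = nums.length ∧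
      monoN'.Pairwise (fun a b => b < a ∧ valAt nums b ≤ valAt nums a) ∧
      (∀ t ∈ monoN', t < k ∧ goodUpto nums t (k + 1) ∧ valAt nums t ≤ valAt nums k ∧
        PySem.List.pyGetD (popA nums (valAt nums k) (k : Int) (monoN.map (fun t : Nat => (t : Int))) ri).2 (t : Int) 0 = (nums.length : Int)) ∧
      (∀ t : Nat, t < k → t ∉ monoN' →
        PySem.List.pyGetD (popA nums (valAt nums k) (k : Int) (monoN.map (fun t : Nat => (t : Int))) ri).2 (t : Int) 0 = (NS nums t : Int)) ∧
      (∀ t : Nat, k ≤ t → t < nums.length →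
        PySem.List.pyGetD (popA nums (valAt nums k) (k : Int) (monoN.map (fun t : Nat => (t : Int))) ri).2 (t : Int) 0 = (nums.length : Int)) := by
  intro monoN
  induction monoN with
  | nil =>
    intro ri hlen _ _ hnon hge
    exact ⟨[], rfl, hlen, List.Pairwise.nil, by simp,
      fun t ht _ => hnon t ht (List.not_mem_nil), hge⟩
  | cons t restN ih =>
    intro ri hlen hpair hmem hnon hge
    obtain ⟨htk, hgood, hri⟩ := hmem t List.mem_cons_self
    have hv : PySem.List.pyGetD nums ((t : Nat) : Int) 0 = valAt nums t :=
      PySem.List.pyGetD_natCast nums t 0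
    obtain ⟨hhead, hpair'⟩ := List.pairwise_cons.1 hpair
    by_cases hcase : valAt nums k < valAt nums t
    · have hstep : popA nums (valAt nums k) (k : Int) ((t :: restN).map (fun s : Nat => (s : Int))) ri
          = popA nums (valAt nums k) (k : Int) (restN.map (fun s : Nat => (s : Int)))
              (PySem.List.pySetD ri ((t : Nat) : Int) ((k : Nat) : Int)) := by
        simp [popA, hv, hcase]
      rw [hstep]
      have htlen : (t : Nat) < ri.length := by omega
      have hget2 : ∀ s : Nat,
          PySem.List.pyGetD (PySem.List.pySetD ri ((t : Nat) : Int) ((k : Nat) : Int)) ((s : Nat) : Int) 0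
          = if s = t then ((k : Nat) : Int) else PySem.List.pyGetD ri ((s : Nat) : Int) 0 :=
        fun s => PySem.List.pyGetD_pySetD_natCast ri t s _ 0 htlen
      apply ih
      · rw [PySem.List.length_pySetD]; exact hlen
      · exact hpair'
      · intro s hs
        obtain ⟨hsk, hsgood, hsri⟩ := hmem s (List.mem_cons_of_mem _ hs)
        have hst : s ≠ t := by have := (hhead s hs).1; omega
        exact ⟨hsk, hsgood, by rw [hget2 s, if_neg hst]; exact hsri⟩
      · intro s hsk hsmem
        by_cases hst : s = t
        · subst hst
          rw [hget2 s, if_pos rfl, NS_eq_of_stop nums s k htk hk hgood hcase]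
        · rw [hget2 s, if_neg hst]
          refine hnon s hsk ?_
          intro hmem'
          rcases List.mem_cons.1 hmem' with h | h
          · exact hst h
          · exact hsmem h
      · intro s hks hsn
        have hst : s ≠ t := by omega
        rw [hget2 s, if_neg hst]; exact hge s hks hsn
    · have hle : valAt nums t ≤ valAt nums k := not_lt.1 hcase
      have hstep : popA nums (valAt nums k) (k : Int) ((t :: restN).map (fun s : Nat => (s : Int))) ri
          = ((t :: restN).map (fun s : Nat => (s : Int)), ri) := by
        simp [popA, hv, hcase]
      rw [hstep]
      refine ⟨t :: restN, rfl, hlen, hpair, ?_, ?_, hge⟩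
      · intro s hs
        rcases List.mem_cons.1 hs with rfl | hs
        · refine ⟨htk, ?_, hle, hri⟩
          intro j hj hjk
          rcases Nat.lt_succ_iff_lt_or_eq.1 hjk with h | rfl
          · exact hgood j hj h
          · exact hle
        · obtain ⟨hsk, hsgood, hsri⟩ := hmem s (List.mem_cons_of_mem _ hs)
          have hsv : valAt nums s ≤ valAt nums k := le_trans (hhead s hs).2 hle
          refine ⟨hsk, ?_, hsv, hsri⟩
          intro j hj hjk
          rcases Nat.lt_succ_iff_lt_or_eq.1 hjk with h | rfl
          · exact hsgood j hj h
          · exact hsv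
      · intro s hsk hsmem
        exact hnon s hsk hsmem

theorem popA_spec (nums : List Int) (k : Nat) (hk : k < nums.length)
    (mono ri : List Int) (hinv : InvA nums k mono ri) :
    InvA nums (k + 1) ((k : Int) :: (popA nums (valAt nums k) (k : Int) mono ri).1)
      (popA nums (valAt nums k) (k : Int) mono ri).2 := by
  obtain ⟨hlen, monoN, hmap, hpair, hmem, hnon, hge⟩ := hinv
  subst hmap
  obtain ⟨monoN', h1, h2, h3, h4, h5, h6⟩ :=
    popA_go nums k hk monoN ri hlen hpair hmem hnon hge
  refine ⟨h2, k :: monoN', by rw [List.map_cons, h1], ?_, ?_, ?_, ?_⟩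
  · refine List.pairwise_cons.2 ⟨?_, h3⟩
    intro s hs
    exact ⟨(h4 s hs).1, (h4 s hs).2.2.1⟩
  · intro s hs
    rcases List.mem_cons.1 hs with rfl | hs
    · refine ⟨Nat.lt_succ_self s, ?_, ?_⟩
      · intro j hj hjk
        exact absurd hj (by omega)
      · exact h6 s le_rfl hk
    · obtain ⟨hsk, hsgood, _, hsri⟩ := h4 s hs
      exact ⟨by omega, hsgood, hsri⟩
  · intro s hsk hsmem
    have hs_ne : s ≠ k := fun h => hsmem (by simp [h])
    have hs_nm : s ∉ monoN' := fun h => hsmem (List.mem_cons_of_mem _ h)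
    exact h5 s (by omega) hs_nm
  · intro s hks hsn
    exact h6 s (by omega) hsn

theorem foldA (nums : List Int) : ∀ (l : List Int) (k : Nat) (mono ri : List Int),
    nums.drop k = l → k ≤ nums.length → InvA nums k mono ri →
    InvA nums nums.length
      ((PySem.List.enumerate l (k : Int)).foldl
        (fun (st : List Int × List Int) p =>
          let r := popA nums p.2 p.1 st.1 st.2
          (p.1 :: r.1, r.2)) (mono, ri)).1
      ((PySem.List.enumerate l (k : Int)).foldl
        (fun (st : List Int × List Int) p =>
          let r := popA nums p.2 p.1 st.1 st.2
          (p.1 :: r.1, r.2)) (mono, ri)).2 := by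
  intro l
  induction l with
  | nil =>
    intro k mono ri hdrop hkle hinv
    have hkn : k = nums.length :=
      le_antisymm hkle (List.drop_eq_nil_iff.1 hdrop)
    subst hkn
    simpa [PySem.List.enumerate] using hinv
  | cons x l ihl =>
    intro k mono ri hdrop hkle hinv
    have hkn : k < nums.length := by
      have := congrArg List.length hdrop
      simp only [List.length_drop, List.length_cons] at this
      omega
    have hx : x = valAt nums k := by
      have h0 : nums[k + 0]? = (nums.drop k)[0]? := (List.getElem?_drop).symm
      rw [hdrop] at h0
      simp only [Nat.add_zero, List.getElem?_cons_zero] at h0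
      simp [valAt, List.getD_eq_getElem?_getD, h0]
    have hdrop' : nums.drop (k + 1) = l := by
      have h1 : nums.drop (k + 1) = (nums.drop k).drop 1 := by
        rw [List.drop_drop]
      rw [h1, hdrop, List.drop_one, List.tail_cons]
    rw [PySem.List.enumerate_cons]
    simp only [List.foldl_cons]
    have hstep := popA_spec nums k hkn mono ri hinv
    have hcast : ((k : Nat) : Int) + 1 = (((k + 1 : Nat)) : Int) := by push_cast; ring
    rw [hcast]
    exact ihl (k + 1) _ _ hdrop' (by omega) (by rw [← hx] at hstep; exact hstep)

theorem sum_S (l : List Int) :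
    ((List.range l.length).map
      (fun j => (1 : Int) + (runLen (l.getD j 0) (l.drop (j + 1)) : Int))).sum = S l := by
  induction l with
  | nil => simp [S]
  | cons v l ih =>
    rw [List.length_cons, List.range_succ_eq_map]
    simp only [List.map_cons, List.map_map, List.sum_cons]
    have : ((List.range l.length).map
        ((fun j => (1 : Int) + (runLen ((v :: l).getD j 0) ((v :: l).drop (j + 1)) : Int)) ∘ Nat.succ))
        = (List.range l.length).map (fun j => (1 : Int) + (runLen (l.getD j 0) (l.drop (j + 1)) : Int)) := by
      apply List.map_congr_left
      intro j _
      simp only [Function.comp_apply, Nat.succ_eq_add_one, List.getD_cons_succ, List.drop_succ_cons]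
    rw [this, ih]
    simp [S]

theorem a_eq_S (nums : List Int) : validSubarrays nums = S nums := by
  unfold validSubarrays
  show (PySem.List.pyRange 0 ((nums.length : Nat) : Int)).foldl
      (fun res i => res +
        (PySem.List.pyGetD
          ((PySem.List.enumerate nums 0).foldl
            (fun (st : List Int × List Int) p =>
              let r := popA nums p.2 p.1 st.1 st.2
              (p.1 :: r.1, r.2))
            ([], List.replicate nums.length ((nums.length : Nat) : Int))).2 i 0 - i)) 0
    = S nums
  have hinv0 : InvA nums 0 [] (List.replicate nums.length ((nums.length : Nat) : Int)) := by
    refine ⟨by simp, [], rfl, List.Pairwise.nil, by simp, by intro t ht; omega, ?_⟩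
    intro t _ htn
    rw [PySem.List.pyGetD_natCast, List.getD_replicate _ htn]
  have hfin := foldA nums nums 0 [] _ rfl (Nat.zero_le _) hinv0
  simp only [Nat.cast_zero] at hfin
  obtain ⟨hlen, monoN, _, _, hmem, hnon, _⟩ := hfin
  have hri : ∀ t : Nat, t < nums.length →
      PySem.List.pyGetD ((PySem.List.enumerate nums 0).foldl
        (fun (st : List Int × List Int) p =>
          let r := popA nums p.2 p.1 st.1 st.2
          (p.1 :: r.1, r.2)) ([], List.replicate nums.length ((nums.length : Nat) : Int))).2
        ((t : Nat) : Int) 0 = ((NS nums t : Nat) : Int) := by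
    intro t htn
    by_cases hmemb : t ∈ monoN
    · obtain ⟨_, hgood, hval⟩ := hmem t hmemb
      rw [hval, NS_eq_of_end nums t htn hgood]
    · exact hnon t htn hmemb
  rw [PySem.List.pyRange_zero_natCast, List.foldl_map]
  rw [PySem.List.foldl_congr_mem _ _
    (fun res (j : Nat) => res + ((1 : Int) + (runLen (nums.getD j 0) (nums.drop (j + 1)) : Int))) 0 ?_]
  · rw [PySem.List.foldl_add, sum_S, zero_add]
  · intro acc j hj
    have hjn : j < nums.length := List.mem_range.1 hj
    rw [hri j hjn]
    simp only [NS, valAt]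
    push_cast
    ring

-- ===== VERDICT (by name: the statement is the Claim_ definition above) =====
theorem validSubarrays_spec : Claim_equal_validSubarrays := by
  intro nums _
  unfold Spec_validSubarrays
  rw [a_eq_S, alt_eq_S]
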